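-- pv_equiv track=rewrite | github.com/chang933/dnt-erp | app/api/deps.py | _allowed_staff_ingredients_api
-- ===== SOURCE A (Python) =====
-- _STAFF_INGREDIENTS_PREFIXES = (
--     "/api/v1/employees",
--     "/api/v1/schedules",
--     "/api/v1/attendance",
--     "/api/v1/documents",
--     "/api/v1/documents-generate",
--     "/api/v1/ingredients",
--     "/api/v1/inventory-logs",
--     "/api/v1/food-costs",
--     "/api/v1/reservations",
-- )
--
-- def _api_path_only(url_path: str) -> str:
--     return url_path.split("?")[0]
--
-- def _allowed_staff_ingredients_api(url_path: str, method: str) -> bool: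
--     """admin(staff_ingredients): 직원(급여 제외)·식자재·예약. 지점은 GET만."""
--     p = _api_path_only(url_path)
--     if p == "/api/v1/auth/me" or p.startswith("/api/v1/auth/me/"):
--         return True
--     if p.startswith("/api/v1/stores"):
--         return method.upper() == "GET"
--     for prefix in _STAFF_INGREDIENTS_PREFIXES:
--         if p == prefix or p.startswith(prefix + "/"):
--             return True
--     return False
-- ===== SOURCE B (Python) =====
-- _STAFF_INGREDIENTS_PREFIXES = (
--     "/api/v1/employees",
--     "/api/v1/schedules",
--     "/api/v1/attendance",
--     "/api/v1/documents",
--     "/api/v1/documents-generate",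
--     "/api/v1/ingredients",
--     "/api/v1/inventory-logs",
--     "/api/v1/food-costs",
--     "/api/v1/reservations",
-- )
--
-- _STAFF_INGREDIENTS_KEYS = frozenset(_STAFF_INGREDIENTS_PREFIXES)
--
--
-- def _allowed_staff_ingredients_api(url_path: str, method: str) -> bool:
--     p = url_path.split("?")[0]
--     if p == "/api/v1/auth/me" or p.startswith("/api/v1/auth/me/"):
--         return True
--     if p.startswith("/api/v1/stores"):
--         return method.upper() == "GET"
--     return "/".join(p.split("/")[:4]) in _STAFF_INGREDIENTS_KEYS
-- ===== Notes on version B (the rewrite author's own statement) =====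
-- stated objective: idiomatic
-- what changed: Replaced A's loop over the nine allowed prefixes (equality-or-startswith per prefix) by canonicalizing the path to its first three segments with '/'.join(p.split('/')[:4]) and a single frozenset membership test.
import Mathlib
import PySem

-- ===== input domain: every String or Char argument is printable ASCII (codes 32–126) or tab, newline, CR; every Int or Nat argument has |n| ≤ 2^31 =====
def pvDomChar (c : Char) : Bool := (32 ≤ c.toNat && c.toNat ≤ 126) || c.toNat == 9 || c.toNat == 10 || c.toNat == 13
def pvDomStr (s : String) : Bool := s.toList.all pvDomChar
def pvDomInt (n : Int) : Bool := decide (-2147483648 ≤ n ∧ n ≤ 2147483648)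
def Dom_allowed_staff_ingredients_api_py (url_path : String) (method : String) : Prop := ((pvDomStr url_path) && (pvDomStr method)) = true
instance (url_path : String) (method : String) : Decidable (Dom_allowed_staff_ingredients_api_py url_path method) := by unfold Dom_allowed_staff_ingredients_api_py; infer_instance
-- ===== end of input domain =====

-- B replaces A's scan over the nine allowed prefixes by canonicalizing the path to its
-- first three segments ('/'.join(p.split('/')[:4])) and one frozenset membership test
-- (objective: idiomatic; same asymptotic cost).

-- ===== PORT A =====
-- _api_path_only: url_path.split("?")[0]; split always returns a nonempty list, so the [] default is unreachable (exact)
def pvApiPathOnly (url_path : String) : List Char :=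
  (PySem.Chars.splitOn url_path.toList ['?']).headD []

def pvStaffPrefixes : List (List Char) :=
  ["/api/v1/employees".toList, "/api/v1/schedules".toList, "/api/v1/attendance".toList,
   "/api/v1/documents".toList, "/api/v1/documents-generate".toList, "/api/v1/ingredients".toList,
   "/api/v1/inventory-logs".toList, "/api/v1/food-costs".toList, "/api/v1/reservations".toList]

-- the 'for prefix in _STAFF_INGREDIENTS_PREFIXES' loop with its early 'return True'
def pvPrefixLoop (p : List Char) : List (List Char) → Bool
  | [] => false
  | q :: rest =>
    if p = q ∨ PySem.Chars.startswith p (q ++ ['/']) = true then true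
    else pvPrefixLoop p rest

def allowed_staff_ingredients_api_py (url_path : String) (method : String) : Bool :=
  let p := pvApiPathOnly url_path
  if p = "/api/v1/auth/me".toList ∨ PySem.Chars.startswith p "/api/v1/auth/me/".toList = true then
    true
  else if PySem.Chars.startswith p "/api/v1/stores".toList = true then
    decide (PySem.Chars.upper method.toList = "GET".toList)
  else
    pvPrefixLoop p pvStaffPrefixes

-- ===== PORT B =====
def pvStaffKeys : PySem.Set (List Char) :=
  PySem.Set.ofList
    ["/api/v1/employees".toList, "/api/v1/schedules".toList, "/api/v1/attendance".toList,
     "/api/v1/documents".toList, "/api/v1/documents-generate".toList, "/api/v1/ingredients".toList,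
     "/api/v1/inventory-logs".toList, "/api/v1/food-costs".toList, "/api/v1/reservations".toList]

def allowed_staff_ingredients_api_py_alt (url_path : String) (method : String) : Bool :=
  let p := (PySem.Chars.splitOn url_path.toList ['?']).headD []   -- url_path.split("?")[0] (nonempty, [0] exact)
  if p = "/api/v1/auth/me".toList ∨ PySem.Chars.startswith p "/api/v1/auth/me/".toList = true then
    true
  else if PySem.Chars.startswith p "/api/v1/stores".toList = true then
    decide (PySem.Chars.upper method.toList = "GET".toList)
  else
    -- "/".join(p.split("/")[:4]) in _STAFF_INGREDIENTS_KEYS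
    PySem.Set.contains pvStaffKeys
      (PySem.Chars.join ['/'] (PySem.List.slice (PySem.Chars.splitOn p ['/']) none (some 4)))

-- ===== PRECONDITION & SPEC =====
def Spec_allowed_staff_ingredients_api_py (url_path : String) (method : String) (out : Bool) : Prop := out = allowed_staff_ingredients_api_py_alt url_path method
instance (url_path : String) (method : String) (out : Bool) : Decidable (Spec_allowed_staff_ingredients_api_py url_path method out) := by unfold Spec_allowed_staff_ingredients_api_py; infer_instance

-- ===== CLAIM (what is proved, stated in full; the proofs are below) =====
def Claim_equal_allowed_staff_ingredients_api_py : Prop := ∀ (url_path : String) (method : String), Dom_allowed_staff_ingredients_api_py url_path method → Spec_allowed_staff_ingredients_api_py url_path method (allowed_staff_ingredients_api_py url_path method)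

-- ===== LEMMAS AND PROOFS =====

-- reference splitter: Python p.split("/") for the one-character separator "/"
def pvSplits : List Char → List (List Char)
  | [] => [[]]
  | c :: t => if c = '/' then [] :: pvSplits t
    else match pvSplits t with
      | h :: tl => (c :: h) :: tl
      | [] => [[c]]

-- the canonical key: p truncated at its (n+1)-st '/' (the join of the first n+1 segments)
def pvKf : Nat → List Char → List Char
  | _, [] => []
  | n, c :: t =>
    if c = '/' then (match n with | 0 => [] | Nat.succ m => '/' :: pvKf m t)
    else c :: pvKf n t

theorem pvSplits_ne_nil (l : List Char) : pvSplits l ≠ [] := by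
  cases l with
  | nil => simp [pvSplits]
  | cons c t =>
    simp only [pvSplits]
    split
    · simp
    · split <;> simp

theorem pvSplits_cons_exists (l : List Char) : ∃ h0 tl, pvSplits l = h0 :: tl := by
  cases hsp : pvSplits l with
  | nil => exact absurd hsp (pvSplits_ne_nil l)
  | cons h0 tl => exact ⟨h0, tl, rfl⟩

theorem pv_go_spec (l : List Char) : ∀ (fuel : Nat) (cur : List Char) (acc : List (List Char)),
    l.length ≤ fuel →
    PySem.Chars.splitOn.go ['/'] fuel l cur acc =
      acc.reverse ++ ((cur.reverse ++ (pvSplits l).headD []) :: (pvSplits l).tail) := by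
  induction l with
  | nil =>
    intro fuel cur acc h
    cases fuel <;> simp [PySem.Chars.splitOn.go, pvSplits]
  | cons c t ih =>
    intro fuel cur acc h
    obtain ⟨h0, tl, hsp⟩ := pvSplits_cons_exists t
    cases fuel with
    | zero => simp at h
    | succ f =>
      by_cases hc : c = '/'
      · subst hc
        rw [show PySem.Chars.splitOn.go ['/'] (f+1) ('/' :: t) cur acc
            = PySem.Chars.splitOn.go ['/'] f t [] (cur.reverse :: acc) from by
          simp [PySem.Chars.splitOn.go, List.isPrefixOf]]
        rw [ih f [] (cur.reverse :: acc) (by simpa using h)]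
        simp [pvSplits, hsp]
      · rw [show PySem.Chars.splitOn.go ['/'] (f+1) (c :: t) cur acc
            = PySem.Chars.splitOn.go ['/'] f t (c :: cur) acc from by
          simp [PySem.Chars.splitOn.go, List.isPrefixOf,
            show ¬('/' = c) from fun h => hc h.symm]]
        rw [ih f (c :: cur) acc (by simpa using Nat.le_of_succ_le_succ h)]
        simp [pvSplits, hsp, if_neg hc]

theorem pv_splitOn_eq (l : List Char) : PySem.Chars.splitOn l ['/'] = pvSplits l := by
  obtain ⟨h0, tl, hsp⟩ := pvSplits_cons_exists l
  rw [show PySem.Chars.splitOn l ['/'] = PySem.Chars.splitOn.go ['/'] (l.length + 1) l [] [] from rfl]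
  rw [pv_go_spec l (l.length + 1) [] [] (by omega)]
  simp [hsp]

theorem pv_join_take (p : List Char) : ∀ n : Nat,
    PySem.Chars.join ['/'] ((pvSplits p).take (n+1)) = pvKf n p := by
  induction p with
  | nil => intro n; simp [pvSplits, pvKf, PySem.Chars.join_singleton]
  | cons c t ih =>
    intro n
    obtain ⟨h0, tl, hsp⟩ := pvSplits_cons_exists t
    by_cases hc : c = '/'
    · subst hc
      cases n with
      | zero => simp [pvSplits, pvKf, PySem.Chars.join_singleton]
      | succ m =>
        rw [show pvSplits ('/'::t) = [] :: pvSplits t from by simp [pvSplits]]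
        rw [show pvKf (m+1) ('/'::t) = '/' :: pvKf m t from by simp [pvKf]]
        have ihm := ih m
        rw [hsp, List.take_succ_cons] at ihm
        rw [hsp, List.take_succ_cons, List.take_succ_cons, PySem.Chars.join_cons_cons, ihm]
        simp
    · simp only [pvSplits, if_neg hc, hsp, pvKf]
      have := ih n
      rw [hsp] at this
      simp only [List.take_succ_cons] at this ⊢
      cases htk : tl.take n with
      | nil =>
        rw [htk] at this
        simpa [PySem.Chars.join_singleton] using this
      | cons u us =>
        rw [htk] at this
        rw [PySem.Chars.join_cons_cons] at this ⊢
        rw [List.cons_append, List.cons_append, this]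

theorem pv_kf_iff (q : List Char) : ∀ (p : List Char) (n : Nat), q.count '/' = n →
    (pvKf n p = q ↔ p = q ∨ (q ++ ['/']) <+: p) := by
  induction q with
  | nil =>
    intro p n hn
    simp at hn; subst hn
    cases p with
    | nil => simp [pvKf]
    | cons c t =>
      by_cases hc : c = '/'
      · subst hc; simp [pvKf, List.cons_prefix_cons]
      · simp [pvKf, hc, List.cons_prefix_cons, show ¬('/' = c) from fun h => hc h.symm]
  | cons d q' ih =>
    intro p n hn
    by_cases hd : d = '/'
    · subst hd
      rw [List.count_cons_self] at hn
      cases p with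
      | nil => simp [pvKf]
      | cons c t =>
        by_cases hc : c = '/'
        · subst hc
          cases n with
          | zero => omega
          | succ m =>
            have := ih t m (by omega)
            simp [pvKf, List.cons_prefix_cons, this]
        · simp [pvKf, hc, List.cons_prefix_cons, show ¬('/' = c) from fun h => hc h.symm]
    · rw [List.count_cons_of_ne (fun h => hd h)] at hn
      cases p with
      | nil => simp [pvKf]
      | cons c t =>
        by_cases hc : c = '/'
        · subst hc
          cases n with
          | zero =>
            simp [pvKf, List.cons_prefix_cons, hd,
              show ¬('/' = d) from fun h => hd h.symm]
          | succ m =>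
            simp [pvKf, List.cons_prefix_cons, hd,
              show ¬('/' = d) from fun h => hd h.symm]
        · have := ih t n hn
          simp only [pvKf, if_neg hc, List.cons_prefix_cons, List.cons.injEq,
            List.cons_append, this]
          constructor
          · rintro ⟨h1, h3 | h3⟩
            · exact Or.inl ⟨h1, h3⟩
            · exact Or.inr ⟨h1.symm, h3⟩
          · rintro (⟨h1, h3⟩ | ⟨h1, h3⟩)
            · exact ⟨h1, Or.inl h3⟩
            · exact ⟨h1.symm, Or.inr h3⟩

theorem pvPrefixLoop_true_iff (p : List Char) (qs : List (List Char)) :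
    pvPrefixLoop p qs = true ↔ ∃ q ∈ qs, p = q ∨ (q ++ ['/']) <+: p := by
  induction qs with
  | nil => simp [pvPrefixLoop]
  | cons q rest ih =>
    simp only [pvPrefixLoop]
    split
    · rename_i h
      rw [PySem.Chars.startswith_iff] at h
      simp only [true_iff]
      exact ⟨q, List.mem_cons_self, h⟩
    · rename_i h
      rw [PySem.Chars.startswith_iff] at h
      rw [ih]
      constructor
      · rintro ⟨q', hq', hp⟩; exact ⟨q', List.mem_cons_of_mem _ hq', hp⟩
      · rintro ⟨q', hq', hp⟩
        rcases List.mem_cons.mp hq' with rfl | hmem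
        · exact absurd hp h
        · exact ⟨q', hmem, hp⟩

-- the third branch: the prefix loop equals the canonical-key set lookup
theorem pv_branch3 (p : List Char) :
    pvPrefixLoop p pvStaffPrefixes =
      PySem.Set.contains pvStaffKeys
        (PySem.Chars.join ['/'] (PySem.List.slice (PySem.Chars.splitOn p ['/']) none (some 4))) := by
  rw [PySem.List.slice_to _ (by norm_num), show ((4 : Int)).toNat = 3 + 1 from rfl]
  rw [pv_splitOn_eq, pv_join_take p 3]
  have hq : ∀ q ∈ pvStaffPrefixes, ((p = q ∨ (q ++ ['/']) <+: p) ↔ pvKf 3 p = q) := by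
    intro q hmem
    have hcount : q.count '/' = 3 := by fin_cases hmem <;> decide
    exact (pv_kf_iff q p 3 hcount).symm
  have hmemkeys : ∀ x, x ∈ pvStaffKeys ↔ x ∈ pvStaffPrefixes := by
    intro x
    rw [show pvStaffKeys = PySem.Set.ofList pvStaffPrefixes from rfl, PySem.Set.mem_ofList]
  rcases hcont : PySem.Set.contains pvStaffKeys (pvKf 3 p) with _ | _
  · by_contra hex
    rw [Bool.not_eq_false, pvPrefixLoop_true_iff] at hex
    obtain ⟨q, hmem, hp⟩ := hex
    have hk : pvKf 3 p ∈ pvStaffKeys := (hmemkeys _).mpr ((hq q hmem).mp hp ▸ hmem)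
    rw [← PySem.Set.contains_iff] at hk
    rw [hcont] at hk
    exact absurd hk (by simp)
  · have hin : pvKf 3 p ∈ pvStaffPrefixes :=
      (hmemkeys _).mp ((PySem.Set.contains_iff _ _).mp hcont)
    rw [pvPrefixLoop_true_iff]
    exact ⟨pvKf 3 p, hin, (hq _ hin).mpr rfl⟩

-- ===== VERDICT (by name: the statement is the Claim_ definition above) =====
theorem allowed_staff_ingredients_api_py_spec : Claim_equal_allowed_staff_ingredients_api_py := by
  intro url_path method _
  unfold Spec_allowed_staff_ingredients_api_py
  unfold allowed_staff_ingredients_api_py allowed_staff_ingredients_api_py_alt pvApiPathOnly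
  simp only []
  split_ifs <;> first | rfl | exact pv_branch3 _
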